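-- pv_equiv track=rewrite | github.com/gsy/leetcode | expressive_words.py | stretchy
-- ===== SOURCE A (Python) =====
-- def stretchy(word, string):
--     # word -> string
--     index, prev, count, stretch, length = 0, None, 0, False, len(word)
--     for char in string:
--         if index < length and char == word[index]:
--             if stretch and count < 3:
--                 return False
--             stretch = False
--             index = index + 1
--             if char == prev:
--                 count = count + 1
--             else:
--                 count = 1
--             prev = char
--         else:
--             if prev and char == prev:
--                 stretch = True
--                 count = count + 1
--             else:
--                 return False
--
--     if stretch:
--         return count >= 3 and index == length
--     else:
--         return index == length
-- ===== SOURCE B (Python) =====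
-- def _rle(s):
--     # run-length encode s into a list of (char, run_length) groups
--     groups = []
--     i = 0
--     n = len(s)
--     while i < n:
--         j = i + 1
--         while j < n and s[j] == s[i]:
--             j += 1
--         groups.append((s[i], j - i))
--         i = j
--     return groups
--
-- def stretchy(word, string):
--     w = _rle(word)
--     s = _rle(string)
--     if len(w) != len(s):
--         return False
--     for (wc, wn), (sc, sn) in zip(w, s):
--         if wc != sc or sn < wn or (wn < sn and sn < 3):
--             return False
--     return True
-- ===== Notes on version B (the rewrite author's own statement) =====
-- stated objective: simpler
-- what changed: Replaces A's single-pass index/prev/count/stretch state machine with a run-length-encode-both-strings-then-compare-groups decomposition: encode word and string into (char, run) lists, require equal length, equal chars, sn >= wn and (sn == wn or sn >= 3) per group.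
import Mathlib
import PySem

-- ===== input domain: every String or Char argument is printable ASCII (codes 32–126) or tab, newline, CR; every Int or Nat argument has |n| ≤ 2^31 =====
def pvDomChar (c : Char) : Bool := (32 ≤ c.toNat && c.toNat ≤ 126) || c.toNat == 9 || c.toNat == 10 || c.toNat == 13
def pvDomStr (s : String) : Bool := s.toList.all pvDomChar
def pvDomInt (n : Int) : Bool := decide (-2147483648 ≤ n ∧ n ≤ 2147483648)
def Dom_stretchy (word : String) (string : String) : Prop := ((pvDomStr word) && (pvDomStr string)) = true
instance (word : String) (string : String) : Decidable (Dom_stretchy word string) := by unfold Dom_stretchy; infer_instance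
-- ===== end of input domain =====

-- B replaces A's single-pass index/prev/count/stretch state machine by run-length
-- encoding both strings and comparing the group lists (objective: simpler).

-- ===== PORT A =====
-- the for-loop over `string` with state (index, prev, count, stretch), then the final return
def loopA (w : List Char) (length : Nat) : List Char → Nat → Option Char → Nat → Bool → Bool
  | [], index, _, count, stretch =>
      if stretch then decide (3 ≤ count) && decide (index = length) else decide (index = length)
  | c :: rest, index, prev, count, stretch =>
      if index < length ∧ w[index]? = some c then
        if stretch ∧ count < 3 then false
        else loopA w length rest (index + 1) (some c) (if some c = prev then count + 1 else 1) false
      else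
        match prev with
        | some p => if c = p then loopA w length rest index prev (count + 1) true else false
        | none => false

def stretchy (word : String) (string : String) : Bool :=
  loopA word.toList word.toList.length string.toList 0 none 0 false

-- ===== PORT B =====
-- inner while loop of _rle: length of the leading run of `c` in the rest of the string
def countRun (c : Char) : List Char → Nat
  | [] => 0
  | x :: xs => if x = c then countRun c xs + 1 else 0

-- outer while loop of _rle: one group per iteration
def rle : List Char → List (Char × Nat)
  | [] => []
  | c :: rest =>
      let run := countRun c rest
      (c, run + 1) :: rle (rest.drop run)
termination_by l => l.length
decreasing_by simp

-- the for-loop over the zipped group lists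
def checkPairs : List ((Char × Nat) × (Char × Nat)) → Bool
  | [] => true
  | ((wc, wn), (sc, sn)) :: rest =>
      if wc ≠ sc ∨ sn < wn ∨ (wn < sn ∧ sn < 3) then false else checkPairs rest

def gcheck (g1 g2 : List (Char × Nat)) : Bool :=
  if g1.length ≠ g2.length then false else checkPairs (g1.zip g2)

def stretchy_alt (word : String) (string : String) : Bool :=
  gcheck (rle word.toList) (rle string.toList)

-- ===== PRECONDITION & SPEC =====
def Spec_stretchy (word : String) (string : String) (out : Bool) : Prop := out = stretchy_alt word string
instance (word : String) (string : String) (out : Bool) : Decidable (Spec_stretchy word string out) := by unfold Spec_stretchy; infer_instance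

-- ===== CLAIM (what is proved, stated in full; the proofs are below) =====
def Claim_equal_stretchy : Prop := ∀ (word : String) (string : String), Dom_stretchy word string → Spec_stretchy word string (stretchy word string)

-- ===== LEMMAS AND PROOFS =====

-- loopA with `index` into w, rephrased on the remaining suffix of w (proof-only helper)
def loopLB : List Char → List Char → Option Char → Nat → Bool → Bool
  | wt, [], _, count, stretch => if stretch then decide (3 ≤ count) && wt.isEmpty else wt.isEmpty
  | wt, c :: rest, prev, count, stretch =>
      match wt with
      | x :: wrest =>
          if c = x then
            if stretch ∧ count < 3 then false
            else loopLB wrest rest (some c) (if some c = prev then count + 1 else 1) false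
          else
            match prev with
            | some p => if c = p then loopLB (x :: wrest) rest prev (count + 1) true else false
            | none => false
      | [] =>
          match prev with
          | some p => if c = p then loopLB [] rest prev (count + 1) true else false
          | none => false

lemma rle_nil : rle [] = [] := by rw [rle.eq_def]

lemma rle_cons (c : Char) (rest : List Char) :
    rle (c :: rest) = (c, countRun c rest + 1) :: rle (rest.drop (countRun c rest)) := by
  rw [rle.eq_def]

lemma gcheck_nil_right (g : List (Char × Nat)) : gcheck g [] = g.isEmpty := by
  cases g <;> simp [gcheck, checkPairs]

lemma gcheck_nil_left (q : (Char × Nat)) (t : List (Char × Nat)) :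
    gcheck [] (q :: t) = false := by
  simp [gcheck]

lemma gcheck_cons (wc sc : Char) (wn sn : Nat) (t1 t2 : List (Char × Nat)) :
    gcheck ((wc, wn) :: t1) ((sc, sn) :: t2) =
      if wc ≠ sc ∨ sn < wn ∨ (wn < sn ∧ sn < 3) then false else gcheck t1 t2 := by
  simp only [gcheck, List.length_cons, List.zip_cons_cons, checkPairs]
  split_ifs <;> simp_all

lemma loopA_eq_loopLB (w : List Char) :
    ∀ (st : List Char) (i : Nat) (prev : Option Char) (count : Nat) (stretch : Bool),
      i ≤ w.length → loopA w w.length st i prev count stretch = loopLB (w.drop i) st prev count stretch := by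
  intro st
  induction st with
  | nil =>
      intro i prev count stretch hi
      have h1 : decide (i = w.length) = (w.drop i).isEmpty := by
        by_cases h : i = w.length <;> simp [h, List.drop_eq_nil_iff] <;> omega
      simp [loopA, loopLB, h1]
  | cons c rest ih =>
      intro i prev count stretch hi
      cases hd : w.drop i with
      | nil =>
          have hw : w.length ≤ i := by simpa [List.drop_eq_nil_iff] using hd
          have hcond : ¬ (i < w.length ∧ w[i]? = some c) := by
            rintro ⟨h1, _⟩; omega
          simp only [loopA, loopLB, if_neg hcond]
          cases prev with
          | none => rfl
          | some p =>
              by_cases hcp : c = p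
              · have h2 := ih i (some p) (count + 1) true hi
                rw [hd] at h2
                simp [hcp, h2]
              · simp [hcp]
      | cons x l =>
          have hlt : i < w.length := by
            by_contra h
            have : w.drop i = [] := by simp [List.drop_eq_nil_iff]; omega
            simp [this] at hd
          have hget : w[i]? = some x := by
            have h0 : (w.drop i).head? = w[i]? := List.head?_drop
            rw [hd] at h0
            simpa using h0.symm
          have hdrop1 : w.drop (i + 1) = l := by
            have : w.drop (i + 1) = (w.drop i).drop 1 := by
              rw [List.drop_drop]
            simp [this, hd]
          by_cases hcx : c = x
          · have hcond : (i < w.length ∧ w[i]? = some c) := ⟨hlt, by simp [hget, hcx]⟩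
            simp only [loopA, loopLB, if_pos hcond, if_pos hcx]
            by_cases hs : stretch = true ∧ count < 3
            · simp [hs]
            · simp only [if_neg hs]
              rw [ih (i + 1) (some c) _ false (by omega), hdrop1]
          · have hcond : ¬ (i < w.length ∧ w[i]? = some c) := by
              rintro ⟨_, h2⟩
              rw [hget] at h2
              injection h2 with h3
              exact hcx h3.symm
            simp only [loopA, loopLB, if_neg hcond, if_neg hcx]
            cases prev with
            | none => rfl
            | some p =>
                by_cases hcp : c = p
                · have h2 := ih i (some p) (count + 1) true hi
                  rw [hd] at h2
                  simp [hcp, h2]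
                · simp [hcp]

lemma loopLB_run (st : List Char) :
    ∀ (wt : List Char) (c : Char) (m : Nat) (b : Bool),
      1 ≤ m → (b = true → countRun c wt = 0) →
      loopLB wt st (some c) m b =
        ((decide (countRun c wt ≤ countRun c st)
          && ((!b && decide (countRun c st = countRun c wt)) || decide (3 ≤ m + countRun c st)))
          && gcheck (rle (wt.drop (countRun c wt))) (rle (st.drop (countRun c st)))) := by
  induction st with
  | nil =>
      intro wt c m b hm hb
      cases b with
      | true =>
          have hw0 : countRun c wt = 0 := hb rfl
          have hrg : gcheck (rle wt) [] = wt.isEmpty := by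
            rw [gcheck_nil_right]
            cases wt <;> simp [rle_nil, rle_cons]
          simp [loopLB, countRun, hw0, rle_nil, hrg]
      | false =>
          cases hwt : countRun c wt with
          | zero =>
              have hrg : gcheck (rle wt) [] = wt.isEmpty := by
                rw [gcheck_nil_right]
                cases wt <;> simp [rle_nil, rle_cons]
              simp [loopLB, countRun, rle_nil, hrg]
          | succ k =>
              have hne : wt.isEmpty = false := by
                cases wt with
                | nil => simp [countRun] at hwt
                | cons => simp
              simp [loopLB, countRun, hne]
  | cons c' rest ih =>
      intro wt c m b hm hb
      by_cases hc : c' = c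
      · subst hc
        have hsn : countRun c' (c' :: rest) = countRun c' rest + 1 := by simp [countRun]
        cases b with
        | true =>
            have hw0 : countRun c' wt = 0 := hb rfl
            have hstep : loopLB wt (c' :: rest) (some c') m true = loopLB wt rest (some c') (m + 1) true := by
              cases wt with
              | nil => simp [loopLB]
              | cons x wrest =>
                  have hx : ¬ c' = x := by
                    intro h; subst h; simp [countRun] at hw0
                  simp [loopLB, hx]
            rw [hstep, ih wt c' (m + 1) true (by omega) (fun _ => hw0), hw0, hsn]
            simp only [List.drop_succ_cons, List.drop_zero]
            have e3 : (3 ≤ m + 1 + countRun c' rest) ↔ (3 ≤ m + (countRun c' rest + 1)) := by omega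
            simp [e3]
        | false =>
            cases wt with
            | nil =>
                have hstep : loopLB [] (c' :: rest) (some c') m false = loopLB [] rest (some c') (m + 1) true := by
                  simp [loopLB]
                rw [hstep, ih [] c' (m + 1) true (by omega) (fun _ => rfl), hsn]
                simp only [List.drop_succ_cons, List.drop_zero, countRun]
                have e3 : (3 ≤ m + 1 + countRun c' rest) ↔ (3 ≤ m + (countRun c' rest + 1)) := by omega
                simp [e3]
            | cons x wrest =>
                by_cases hx : x = c'
                · subst hx
                  have hwn : countRun x (x :: wrest) = countRun x wrest + 1 := by simp [countRun]
                  have hstep : loopLB (x :: wrest) (x :: rest) (some x) m false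
                      = loopLB wrest rest (some x) (m + 1) false := by
                    simp [loopLB]
                  rw [hstep, ih wrest x (m + 1) false (by omega) (by intro h; exact absurd h (by simp))]
                  rw [hwn, hsn]
                  simp only [List.drop_succ_cons]
                  have e1 : (countRun x wrest + 1 ≤ countRun x rest + 1) ↔ (countRun x wrest ≤ countRun x rest) := by omega
                  have e2 : (countRun x rest + 1 = countRun x wrest + 1) ↔ (countRun x rest = countRun x wrest) := by omega
                  have e3 : (3 ≤ m + (countRun x rest + 1)) ↔ (3 ≤ m + 1 + countRun x rest) := by omega
                  simp [e1, e3]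

                · have hw0 : countRun c' (x :: wrest) = 0 := by simp [countRun, hx]
                  have hstep : loopLB (x :: wrest) (c' :: rest) (some c') m false
                      = loopLB (x :: wrest) rest (some c') (m + 1) true := by
                    have hcx : ¬ c' = x := fun h => hx h.symm
                    simp [loopLB, hcx]
                  rw [hstep, ih (x :: wrest) c' (m + 1) true (by omega) (fun _ => hw0), hw0, hsn]
                  simp only [List.drop_succ_cons, List.drop_zero]
                  have e3 : (3 ≤ m + 1 + countRun c' rest) ↔ (3 ≤ m + (countRun c' rest + 1)) := by omega
                  simp [e3]
      · -- c' ≠ c : the run of c in string has ended here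
        have hsn : countRun c (c' :: rest) = 0 := by simp [countRun, hc]
        rw [hsn]
        cases wt with
        | nil =>
            have hlhs : loopLB [] (c' :: rest) (some c) m b = false := by
              simp [loopLB, hc]
            have hrhs : gcheck [] (rle (c' :: rest)) = false := by
              rw [rle_cons]; exact gcheck_nil_left _ _
            simp [hlhs, countRun, rle_nil, hrhs]
        | cons x wrest =>
            by_cases hx : x = c
            · subst hx
              have hwn : countRun x (x :: wrest) = countRun x wrest + 1 := by simp [countRun]
              have hlhs : loopLB (x :: wrest) (c' :: rest) (some x) m b = false := by
                simp [loopLB, hc]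
              simp [hlhs, hwn]
            · have hw0 : countRun c (x :: wrest) = 0 := by simp [countRun, hx]
              rw [hw0]
              by_cases hcx : c' = x
              · subst hcx
                -- fresh run starts: first char of the next group matches the word
                have hcnt : (if some c' = some c then m + 1 else 1) = 1 := by
                  simp [hc]
                have hstep : loopLB (c' :: wrest) (c' :: rest) (some c) m b
                    = ((!b || !decide (m < 3)) && loopLB wrest rest (some c') 1 false) := by
                  simp [loopLB, hc]
                rw [hstep]
                simp only [List.drop_zero]
                have hrhs : gcheck (rle (c' :: wrest)) (rle (c' :: rest))
                    = if countRun c' rest < countRun c' wrest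
                        ∨ (countRun c' wrest < countRun c' rest ∧ countRun c' rest + 1 < 3)
                      then false
                      else gcheck (rle (wrest.drop (countRun c' wrest))) (rle (rest.drop (countRun c' rest))) := by
                  rw [rle_cons, rle_cons, gcheck_cons]
                  have : ((¬ c' = c') ∨ countRun c' rest + 1 < countRun c' wrest + 1
                      ∨ (countRun c' wrest + 1 < countRun c' rest + 1 ∧ countRun c' rest + 1 < 3))
                      ↔ (countRun c' rest < countRun c' wrest
                        ∨ (countRun c' wrest < countRun c' rest ∧ countRun c' rest + 1 < 3)) := by
                    constructor
                    · rintro (h | h | h) <;> first | exact absurd rfl h | omega | exact Or.inl (by omega) | exact Or.inr (by omega)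
                    · rintro (h | h)
                      · exact Or.inr (Or.inl (by omega))
                      · exact Or.inr (Or.inr (by omega))
                  rw [if_congr this rfl rfl]
                rw [hrhs, ih wrest c' 1 false (by omega) (by intro h; exact absurd h (by simp))]
                split_ifs with h <;>
                  cases b <;>
                    cases hg : gcheck (rle (List.drop (countRun c' wrest) wrest))
                        (rle (List.drop (countRun c' rest) rest)) <;>
                      simp [hg] <;> first
                        | omega
                        | (rw [Bool.eq_iff_iff]; simp; omega)
              · have hlhs : loopLB (x :: wrest) (c' :: rest) (some c) m b = false := by
                  simp [loopLB, hcx, hc]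
                have hrhs : gcheck (rle (x :: wrest)) (rle (c' :: rest)) = false := by
                  rw [rle_cons, rle_cons, gcheck_cons]
                  have hne : ¬ x = c' := fun h => hcx h.symm
                  simp [hne]
                simp [hlhs, hrhs]

lemma loopLB_top (wt st : List Char) :
    loopLB wt st none 0 false = gcheck (rle wt) (rle st) := by
  cases st with
  | nil =>
      rw [rle_nil, gcheck_nil_right]
      cases wt with
      | nil => simp [loopLB, rle_nil]
      | cons x wrest => simp [loopLB, rle_cons]
  | cons c rest =>
      cases wt with
      | nil =>
          have h0 : gcheck [] (rle (c :: rest)) = false := by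
            rw [rle_cons]; exact gcheck_nil_left _ _
          simp [loopLB, rle_nil, h0]
      | cons x wrest =>
          by_cases hcx : c = x
          · subst hcx
            have hstep : loopLB (c :: wrest) (c :: rest) none 0 false
                = loopLB wrest rest (some c) 1 false := by
              simp [loopLB]
            rw [hstep, loopLB_run rest wrest c 1 false (by omega) (by intro h; exact absurd h (by simp))]
            rw [rle_cons, rle_cons, gcheck_cons]
            have hiff : ((¬ c = c) ∨ countRun c rest + 1 < countRun c wrest + 1
                ∨ (countRun c wrest + 1 < countRun c rest + 1 ∧ countRun c rest + 1 < 3))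
                ↔ (countRun c rest < countRun c wrest
                  ∨ (countRun c wrest < countRun c rest ∧ countRun c rest + 1 < 3)) := by
              constructor
              · rintro (h | h | h)
                · exact absurd rfl h
                · exact Or.inl (by omega)
                · exact Or.inr (by omega)
              · rintro (h | h)
                · exact Or.inr (Or.inl (by omega))
                · exact Or.inr (Or.inr (by omega))
            rw [if_congr hiff rfl rfl]
            split_ifs with h <;>
              cases hg : gcheck (rle (List.drop (countRun c wrest) wrest))
                  (rle (List.drop (countRun c rest) rest)) <;>
                simp [hg] <;> first
                  | omega
                  | (rw [Bool.eq_iff_iff]; simp; omega)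
          · have hlhs : loopLB (x :: wrest) (c :: rest) none 0 false = false := by
              simp [loopLB, hcx]
            have hrhs : gcheck (rle (x :: wrest)) (rle (c :: rest)) = false := by
              rw [rle_cons, rle_cons, gcheck_cons]
              have hne : ¬ x = c := fun h => hcx h.symm
              simp [hne]
            simp [hlhs, hrhs]

-- ===== VERDICT (by name: the statement is the Claim_ definition above) =====
theorem stretchy_spec : Claim_equal_stretchy := by
  intro word string _
  unfold Spec_stretchy stretchy stretchy_alt
  rw [loopA_eq_loopLB word.toList string.toList 0 none 0 false (by omega)]
  simpa using loopLB_top word.toList string.toList
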